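-- pv_equiv track=rewrite | github.com/ShepherdCode/ShepherdML | TumorI/blue_green_heatmap.py | pixel_to_heatmap
-- ===== SOURCE A (Python) =====
-- def pixel_to_heatmap(green,blue):   # TO DO: this is slow, need a hash function
--     bins=[10,20,30,40,50,60,70,80,90,256]
--     gbin=None
--     bbin=None
--     for bin in range(0,10):
--         if gbin is None and green<=bins[bin]:
--             gbin=bin
--         if bbin is None and blue<=bins[bin]:
--             bbin=bin
--         if gbin is not None and bbin is not None:
--             return gbin,bbin
--     return gbin,bbin
-- ===== SOURCE B (Python) =====
-- import bisect
--
-- def pixel_to_heatmap(green, blue):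
--     bins = [10, 20, 30, 40, 50, 60, 70, 80, 90, 256]
--     g = bisect.bisect_left(bins, green)
--     b = bisect.bisect_left(bins, blue)
--     return (None if g == 10 else g, None if b == 10 else b)
-- ===== Notes on version B (the rewrite author's own statement) =====
-- stated objective: idiomatic
-- what changed: Replaces the interleaved linear probing loop with two independent bisect.bisect_left binary searches over the sorted threshold array.
-- outside the precondition, e.g. on pixel_to_heatmap(300, 5): A returns (None, 0), B returns (None, 0)
import Mathlib
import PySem

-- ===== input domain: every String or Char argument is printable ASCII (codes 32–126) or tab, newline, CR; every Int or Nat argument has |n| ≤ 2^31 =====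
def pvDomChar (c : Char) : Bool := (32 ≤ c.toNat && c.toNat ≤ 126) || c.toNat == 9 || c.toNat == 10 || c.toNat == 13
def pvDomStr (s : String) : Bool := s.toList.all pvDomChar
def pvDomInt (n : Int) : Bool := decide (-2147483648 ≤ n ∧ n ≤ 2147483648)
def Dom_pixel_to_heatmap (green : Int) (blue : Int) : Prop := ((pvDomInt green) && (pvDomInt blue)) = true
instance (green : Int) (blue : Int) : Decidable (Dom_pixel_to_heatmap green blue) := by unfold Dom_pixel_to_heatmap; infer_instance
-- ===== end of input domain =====

-- B replaces A's interleaved linear probing loop with two independent binary searches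
-- (bisect_left) over the sorted threshold array (idiomatic; no speed claim).
-- On inputs with a component > 256 the Python functions put None in the returned tuple
-- (not an int); those inputs are outside Pre_, and the ports encode that None as -1 there.

-- ===== PORT A =====
-- A's loop over range(0,10) with the interleaved gbin/bbin updates and the early return.
def pvLoopA (green blue : Int) (bins : List Int) : List Int → Option Int × Option Int → Option Int × Option Int
  | [], st => st
  | i :: rest, (gbin, bbin) =>
    let gbin' := if gbin = none ∧ green ≤ bins.getD i.toNat 0 then some i else gbin
    let bbin' := if bbin = none ∧ blue ≤ bins.getD i.toNat 0 then some i else bbin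
    if gbin' ≠ none ∧ bbin' ≠ none then (gbin', bbin')   -- the early return
    else pvLoopA green blue bins rest (gbin', bbin')

def pixel_to_heatmap (green : Int) (blue : Int) : Int × Int :=
  let bins : List Int := [10, 20, 30, 40, 50, 60, 70, 80, 90, 256]
  let st := pvLoopA green blue bins (PySem.List.pyRange 0 10 1) (none, none)
  (st.1.getD (-1), st.2.getD (-1))   -- None encoded as -1 (only reachable outside Pre_)

-- ===== PORT B =====
-- bisect.bisect_left, transliterated (while lo < hi: mid = (lo+hi)//2; …).
def pvBisectLeft (a : List Int) (x : Int) (lo hi : Nat) : Nat :=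
  if lo < hi then
    let mid := (lo + hi) / 2
    if a.getD mid 0 < x then pvBisectLeft a x (mid + 1) hi
    else pvBisectLeft a x lo mid
  else lo
termination_by hi - lo

def pixel_to_heatmap_alt (green : Int) (blue : Int) : Int × Int :=
  let bins : List Int := [10, 20, 30, 40, 50, 60, 70, 80, 90, 256]
  let g := pvBisectLeft bins green 0 bins.length
  let b := pvBisectLeft bins blue 0 bins.length
  (if g = 10 then -1 else (g : Int), if b = 10 then -1 else (b : Int))   -- None encoded as -1

-- ===== PRECONDITION & SPEC =====
-- Pre_ excludes inputs with a component > 256: there A returns a tuple containing None,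
-- which is not a value of the declared Int × Int return type.
def Pre_pixel_to_heatmap (green : Int) (blue : Int) : Prop := green ≤ 256 ∧ blue ≤ 256
instance (green : Int) (blue : Int) : Decidable (Pre_pixel_to_heatmap green blue) := by
  unfold Pre_pixel_to_heatmap; infer_instance
def pvWitness_pixel_to_heatmap : Int × Int := (35, 200)

def Spec_pixel_to_heatmap (green : Int) (blue : Int) (out : Int × Int) : Prop := out = pixel_to_heatmap_alt green blue
instance (green : Int) (blue : Int) (out : Int × Int) : Decidable (Spec_pixel_to_heatmap green blue out) := by unfold Spec_pixel_to_heatmap; infer_instance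

-- ===== CLAIM (what is proved, stated in full; the proofs are below) =====
def Claim_equal_pixel_to_heatmap : Prop := ∀ (green : Int) (blue : Int), Dom_pixel_to_heatmap green blue → Pre_pixel_to_heatmap green blue → Spec_pixel_to_heatmap green blue (pixel_to_heatmap green blue)

-- ===== LEMMAS AND PROOFS =====

-- single-channel reading of A's loop (proof device)
def pvChan (x : Int) (bins : List Int) : List Int → Option Int → Option Int
  | [], o => o
  | i :: rest, o => pvChan x bins rest (if o = none ∧ x ≤ bins.getD i.toNat 0 then some i else o)

theorem pvChan_some (x : Int) (bins : List Int) (l : List Int) (k : Int) :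
    pvChan x bins l (some k) = some k := by
  induction l with
  | nil => rfl
  | cons i rest ih => simpa [pvChan] using ih

-- A's interleaved loop computes the two channels independently (the early return is a no-op)
theorem pvLoopA_split (green blue : Int) (bins : List Int) (l : List Int)
    (og ob : Option Int) :
    pvLoopA green blue bins l (og, ob) = (pvChan green bins l og, pvChan blue bins l ob) := by
  induction l generalizing og ob with
  | nil => rfl
  | cons i rest ih =>
    rcases og with _ | kg <;> rcases ob with _ | kb <;>
      simp only [pvLoopA, pvChan] <;>
      split_ifs <;>
      simp_all [pvChan_some]

theorem chan_cons_neg (x : Int) (bins : List Int) (i : Int) (rest : List Int)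
    (h : ¬ x ≤ bins.getD i.toNat 0) :
    pvChan x bins (i :: rest) none = pvChan x bins rest none := by
  show pvChan x bins rest
      (if (none : Option Int) = none ∧ x ≤ bins.getD i.toNat 0 then some i else none)
    = pvChan x bins rest none
  rw [if_neg (fun hc => h hc.2)]

theorem chan_cons_pos (x : Int) (bins : List Int) (i : Int) (rest : List Int)
    (h : x ≤ bins.getD i.toNat 0) :
    pvChan x bins (i :: rest) none = some i := by
  show pvChan x bins rest
      (if (none : Option Int) = none ∧ x ≤ bins.getD i.toNat 0 then some i else none)
    = some i
  rw [if_pos ⟨rfl, h⟩, pvChan_some]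

theorem pvBl_0 (x : Int) (hx : x ≤ 10) : pvBisectLeft [10,20,30,40,50,60,70,80,90,256] x 0 10 = 0 := by
  rw [pvBisectLeft]; norm_num [(show ¬((60:Int) < x) by omega)]
  rw [pvBisectLeft]; norm_num [(show ¬((30:Int) < x) by omega)]
  rw [pvBisectLeft]; norm_num [(show ¬((20:Int) < x) by omega)]
  rw [pvBisectLeft]; norm_num [(show ¬((10:Int) < x) by omega)]
  rw [pvBisectLeft]; norm_num

theorem pvChanEval_0 (x : Int) (hx : x ≤ 10) : pvChan x [10,20,30,40,50,60,70,80,90,256] [0,1,2,3,4,5,6,7,8,9] none = some 0 := by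
  rw [chan_cons_pos x [10,20,30,40,50,60,70,80,90,256] 0 _ (by rw [show (([10,20,30,40,50,60,70,80,90,256] : List Int).getD (Int.toNat 0) 0) = (10:Int) from rfl]; omega)]

theorem pvBl_1 (x : Int) (hlo : 10 < x) (hx : x ≤ 20) : pvBisectLeft [10,20,30,40,50,60,70,80,90,256] x 0 10 = 1 := by
  rw [pvBisectLeft]; norm_num [(show ¬((60:Int) < x) by omega)]
  rw [pvBisectLeft]; norm_num [(show ¬((30:Int) < x) by omega)]
  rw [pvBisectLeft]; norm_num [(show ¬((20:Int) < x) by omega)]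
  rw [pvBisectLeft]; norm_num [(show (10:Int) < x by omega)]
  rw [pvBisectLeft]; norm_num

theorem pvChanEval_1 (x : Int) (hlo : 10 < x) (hx : x ≤ 20) : pvChan x [10,20,30,40,50,60,70,80,90,256] [0,1,2,3,4,5,6,7,8,9] none = some 1 := by
  rw [chan_cons_neg x [10,20,30,40,50,60,70,80,90,256] 0 _ (by rw [show (([10,20,30,40,50,60,70,80,90,256] : List Int).getD (Int.toNat 0) 0) = (10:Int) from rfl]; omega), chan_cons_pos x [10,20,30,40,50,60,70,80,90,256] 1 _ (by rw [show (([10,20,30,40,50,60,70,80,90,256] : List Int).getD (Int.toNat 1) 0) = (20:Int) from rfl]; omega)]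

theorem pvBl_2 (x : Int) (hlo : 20 < x) (hx : x ≤ 30) : pvBisectLeft [10,20,30,40,50,60,70,80,90,256] x 0 10 = 2 := by
  rw [pvBisectLeft]; norm_num [(show ¬((60:Int) < x) by omega)]
  rw [pvBisectLeft]; norm_num [(show ¬((30:Int) < x) by omega)]
  rw [pvBisectLeft]; norm_num [(show (20:Int) < x by omega)]
  rw [pvBisectLeft]; norm_num

theorem pvChanEval_2 (x : Int) (hlo : 20 < x) (hx : x ≤ 30) : pvChan x [10,20,30,40,50,60,70,80,90,256] [0,1,2,3,4,5,6,7,8,9] none = some 2 := by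
  rw [chan_cons_neg x [10,20,30,40,50,60,70,80,90,256] 0 _ (by rw [show (([10,20,30,40,50,60,70,80,90,256] : List Int).getD (Int.toNat 0) 0) = (10:Int) from rfl]; omega), chan_cons_neg x [10,20,30,40,50,60,70,80,90,256] 1 _ (by rw [show (([10,20,30,40,50,60,70,80,90,256] : List Int).getD (Int.toNat 1) 0) = (20:Int) from rfl]; omega), chan_cons_pos x [10,20,30,40,50,60,70,80,90,256] 2 _ (by rw [show (([10,20,30,40,50,60,70,80,90,256] : List Int).getD (Int.toNat 2) 0) = (30:Int) from rfl]; omega)]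

theorem pvBl_3 (x : Int) (hlo : 30 < x) (hx : x ≤ 40) : pvBisectLeft [10,20,30,40,50,60,70,80,90,256] x 0 10 = 3 := by
  rw [pvBisectLeft]; norm_num [(show ¬((60:Int) < x) by omega)]
  rw [pvBisectLeft]; norm_num [(show (30:Int) < x by omega)]
  rw [pvBisectLeft]; norm_num [(show ¬((50:Int) < x) by omega)]
  rw [pvBisectLeft]; norm_num [(show ¬((40:Int) < x) by omega)]
  rw [pvBisectLeft]; norm_num

theorem pvChanEval_3 (x : Int) (hlo : 30 < x) (hx : x ≤ 40) : pvChan x [10,20,30,40,50,60,70,80,90,256] [0,1,2,3,4,5,6,7,8,9] none = some 3 := by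
  rw [chan_cons_neg x [10,20,30,40,50,60,70,80,90,256] 0 _ (by rw [show (([10,20,30,40,50,60,70,80,90,256] : List Int).getD (Int.toNat 0) 0) = (10:Int) from rfl]; omega), chan_cons_neg x [10,20,30,40,50,60,70,80,90,256] 1 _ (by rw [show (([10,20,30,40,50,60,70,80,90,256] : List Int).getD (Int.toNat 1) 0) = (20:Int) from rfl]; omega), chan_cons_neg x [10,20,30,40,50,60,70,80,90,256] 2 _ (by rw [show (([10,20,30,40,50,60,70,80,90,256] : List Int).getD (Int.toNat 2) 0) = (30:Int) from rfl]; omega), chan_cons_pos x [10,20,30,40,50,60,70,80,90,256] 3 _ (by rw [show (([10,20,30,40,50,60,70,80,90,256] : List Int).getD (Int.toNat 3) 0) = (40:Int) from rfl]; omega)]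

theorem pvBl_4 (x : Int) (hlo : 40 < x) (hx : x ≤ 50) : pvBisectLeft [10,20,30,40,50,60,70,80,90,256] x 0 10 = 4 := by
  rw [pvBisectLeft]; norm_num [(show ¬((60:Int) < x) by omega)]
  rw [pvBisectLeft]; norm_num [(show (30:Int) < x by omega)]
  rw [pvBisectLeft]; norm_num [(show ¬((50:Int) < x) by omega)]
  rw [pvBisectLeft]; norm_num [(show (40:Int) < x by omega)]
  rw [pvBisectLeft]; norm_num

theorem pvChanEval_4 (x : Int) (hlo : 40 < x) (hx : x ≤ 50) : pvChan x [10,20,30,40,50,60,70,80,90,256] [0,1,2,3,4,5,6,7,8,9] none = some 4 := by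
  rw [chan_cons_neg x [10,20,30,40,50,60,70,80,90,256] 0 _ (by rw [show (([10,20,30,40,50,60,70,80,90,256] : List Int).getD (Int.toNat 0) 0) = (10:Int) from rfl]; omega), chan_cons_neg x [10,20,30,40,50,60,70,80,90,256] 1 _ (by rw [show (([10,20,30,40,50,60,70,80,90,256] : List Int).getD (Int.toNat 1) 0) = (20:Int) from rfl]; omega), chan_cons_neg x [10,20,30,40,50,60,70,80,90,256] 2 _ (by rw [show (([10,20,30,40,50,60,70,80,90,256] : List Int).getD (Int.toNat 2) 0) = (30:Int) from rfl]; omega), chan_cons_neg x [10,20,30,40,50,60,70,80,90,256] 3 _ (by rw [show (([10,20,30,40,50,60,70,80,90,256] : List Int).getD (Int.toNat 3) 0) = (40:Int) from rfl]; omega), chan_cons_pos x [10,20,30,40,50,60,70,80,90,256] 4 _ (by rw [show (([10,20,30,40,50,60,70,80,90,256] : List Int).getD (Int.toNat 4) 0) = (50:Int) from rfl]; omega)]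

theorem pvBl_5 (x : Int) (hlo : 50 < x) (hx : x ≤ 60) : pvBisectLeft [10,20,30,40,50,60,70,80,90,256] x 0 10 = 5 := by
  rw [pvBisectLeft]; norm_num [(show ¬((60:Int) < x) by omega)]
  rw [pvBisectLeft]; norm_num [(show (30:Int) < x by omega)]
  rw [pvBisectLeft]; norm_num [(show (50:Int) < x by omega)]
  rw [pvBisectLeft]; norm_num

theorem pvChanEval_5 (x : Int) (hlo : 50 < x) (hx : x ≤ 60) : pvChan x [10,20,30,40,50,60,70,80,90,256] [0,1,2,3,4,5,6,7,8,9] none = some 5 := by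
  rw [chan_cons_neg x [10,20,30,40,50,60,70,80,90,256] 0 _ (by rw [show (([10,20,30,40,50,60,70,80,90,256] : List Int).getD (Int.toNat 0) 0) = (10:Int) from rfl]; omega), chan_cons_neg x [10,20,30,40,50,60,70,80,90,256] 1 _ (by rw [show (([10,20,30,40,50,60,70,80,90,256] : List Int).getD (Int.toNat 1) 0) = (20:Int) from rfl]; omega), chan_cons_neg x [10,20,30,40,50,60,70,80,90,256] 2 _ (by rw [show (([10,20,30,40,50,60,70,80,90,256] : List Int).getD (Int.toNat 2) 0) = (30:Int) from rfl]; omega), chan_cons_neg x [10,20,30,40,50,60,70,80,90,256] 3 _ (by rw [show (([10,20,30,40,50,60,70,80,90,256] : List Int).getD (Int.toNat 3) 0) = (40:Int) from rfl]; omega), chan_cons_neg x [10,20,30,40,50,60,70,80,90,256] 4 _ (by rw [show (([10,20,30,40,50,60,70,80,90,256] : List Int).getD (Int.toNat 4) 0) = (50:Int) from rfl]; omega), chan_cons_pos x [10,20,30,40,50,60,70,80,90,256] 5 _ (by rw [show (([10,20,30,40,50,60,70,80,90,256] : List Int).getD (Int.toNat 5) 0) = (60:Int) from rfl]; omega)]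

theorem pvBl_6 (x : Int) (hlo : 60 < x) (hx : x ≤ 70) : pvBisectLeft [10,20,30,40,50,60,70,80,90,256] x 0 10 = 6 := by
  rw [pvBisectLeft]; norm_num [(show (60:Int) < x by omega)]
  rw [pvBisectLeft]; norm_num [(show ¬((90:Int) < x) by omega)]
  rw [pvBisectLeft]; norm_num [(show ¬((80:Int) < x) by omega)]
  rw [pvBisectLeft]; norm_num [(show ¬((70:Int) < x) by omega)]
  rw [pvBisectLeft]; norm_num

theorem pvChanEval_6 (x : Int) (hlo : 60 < x) (hx : x ≤ 70) : pvChan x [10,20,30,40,50,60,70,80,90,256] [0,1,2,3,4,5,6,7,8,9] none = some 6 := by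
  rw [chan_cons_neg x [10,20,30,40,50,60,70,80,90,256] 0 _ (by rw [show (([10,20,30,40,50,60,70,80,90,256] : List Int).getD (Int.toNat 0) 0) = (10:Int) from rfl]; omega), chan_cons_neg x [10,20,30,40,50,60,70,80,90,256] 1 _ (by rw [show (([10,20,30,40,50,60,70,80,90,256] : List Int).getD (Int.toNat 1) 0) = (20:Int) from rfl]; omega), chan_cons_neg x [10,20,30,40,50,60,70,80,90,256] 2 _ (by rw [show (([10,20,30,40,50,60,70,80,90,256] : List Int).getD (Int.toNat 2) 0) = (30:Int) from rfl]; omega), chan_cons_neg x [10,20,30,40,50,60,70,80,90,256] 3 _ (by rw [show (([10,20,30,40,50,60,70,80,90,256] : List Int).getD (Int.toNat 3) 0) = (40:Int) from rfl]; omega), chan_cons_neg x [10,20,30,40,50,60,70,80,90,256] 4 _ (by rw [show (([10,20,30,40,50,60,70,80,90,256] : List Int).getD (Int.toNat 4) 0) = (50:Int) from rfl]; omega), chan_cons_neg x [10,20,30,40,50,60,70,80,90,256] 5 _ (by rw [show (([10,20,30,40,50,60,70,80,90,256] : List Int).getD (Int.toNat 5) 0) = (60:Int) from rfl]; omega), chan_cons_pos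 x [10,20,30,40,50,60,70,80,90,256] 6 _ (by rw [show (([10,20,30,40,50,60,70,80,90,256] : List Int).getD (Int.toNat 6) 0) = (70:Int) from rfl]; omega)]

theorem pvBl_7 (x : Int) (hlo : 70 < x) (hx : x ≤ 80) : pvBisectLeft [10,20,30,40,50,60,70,80,90,256] x 0 10 = 7 := by
  rw [pvBisectLeft]; norm_num [(show (60:Int) < x by omega)]
  rw [pvBisectLeft]; norm_num [(show ¬((90:Int) < x) by omega)]
  rw [pvBisectLeft]; norm_num [(show ¬((80:Int) < x) by omega)]
  rw [pvBisectLeft]; norm_num [(show (70:Int) < x by omega)]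
  rw [pvBisectLeft]; norm_num

theorem pvChanEval_7 (x : Int) (hlo : 70 < x) (hx : x ≤ 80) : pvChan x [10,20,30,40,50,60,70,80,90,256] [0,1,2,3,4,5,6,7,8,9] none = some 7 := by
  rw [chan_cons_neg x [10,20,30,40,50,60,70,80,90,256] 0 _ (by rw [show (([10,20,30,40,50,60,70,80,90,256] : List Int).getD (Int.toNat 0) 0) = (10:Int) from rfl]; omega), chan_cons_neg x [10,20,30,40,50,60,70,80,90,256] 1 _ (by rw [show (([10,20,30,40,50,60,70,80,90,256] : List Int).getD (Int.toNat 1) 0) = (20:Int) from rfl]; omega), chan_cons_neg x [10,20,30,40,50,60,70,80,90,256] 2 _ (by rw [show (([10,20,30,40,50,60,70,80,90,256] : List Int).getD (Int.toNat 2) 0) = (30:Int) from rfl]; omega), chan_cons_neg x [10,20,30,40,50,60,70,80,90,256] 3 _ (by rw [show (([10,20,30,40,50,60,70,80,90,256] : List Int).getD (Int.toNat 3) 0) = (40:Int) from rfl]; omega), chan_cons_neg x [10,20,30,40,50,60,70,80,90,256] 4 _ (by rw [show (([10,20,30,40,50,60,70,80,90,256] : List Int).getD (Int.toNat 4) 0)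 = (50:Int) from rfl]; omega), chan_cons_neg x [10,20,30,40,50,60,70,80,90,256] 5 _ (by rw [show (([10,20,30,40,50,60,70,80,90,256] : List Int).getD (Int.toNat 5) 0) = (60:Int) from rfl]; omega), chan_cons_neg x [10,20,30,40,50,60,70,80,90,256] 6 _ (by rw [show (([10,20,30,40,50,60,70,80,90,256] : List Int).getD (Int.toNat 6) 0) = (70:Int) from rfl]; omega), chan_cons_pos x [10,20,30,40,50,60,70,80,90,256] 7 _ (by rw [show (([10,20,30,40,50,60,70,80,90,256] : List Int).getD (Int.toNat 7) 0) = (80:Int) from rfl]; omega)]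

theorem pvBl_8 (x : Int) (hlo : 80 < x) (hx : x ≤ 90) : pvBisectLeft [10,20,30,40,50,60,70,80,90,256] x 0 10 = 8 := by
  rw [pvBisectLeft]; norm_num [(show (60:Int) < x by omega)]
  rw [pvBisectLeft]; norm_num [(show ¬((90:Int) < x) by omega)]
  rw [pvBisectLeft]; norm_num [(show (80:Int) < x by omega)]
  rw [pvBisectLeft]; norm_num

theorem pvChanEval_8 (x : Int) (hlo : 80 < x) (hx : x ≤ 90) : pvChan x [10,20,30,40,50,60,70,80,90,256] [0,1,2,3,4,5,6,7,8,9] none = some 8 := by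
  rw [chan_cons_neg x [10,20,30,40,50,60,70,80,90,256] 0 _ (by rw [show (([10,20,30,40,50,60,70,80,90,256] : List Int).getD (Int.toNat 0) 0) = (10:Int) from rfl]; omega), chan_cons_neg x [10,20,30,40,50,60,70,80,90,256] 1 _ (by rw [show (([10,20,30,40,50,60,70,80,90,256] : List Int).getD (Int.toNat 1) 0) = (20:Int) from rfl]; omega), chan_cons_neg x [10,20,30,40,50,60,70,80,90,256] 2 _ (by rw [show (([10,20,30,40,50,60,70,80,90,256] : List Int).getD (Int.toNat 2) 0) = (30:Int) from rfl]; omega), chan_cons_neg x [10,20,30,40,50,60,70,80,90,256] 3 _ (by rw [show (([10,20,30,40,50,60,70,80,90,256] : List Int).getD (Int.toNat 3) 0) = (40:Int) from rfl]; omega), chan_cons_neg x [10,20,30,40,50,60,70,80,90,256] 4 _ (by rw [show (([10,20,30,40,50,60,70,80,90,256] : List Int).getD (Int.toNat 4) 0) = (50:Int) from rfl]; omega), chan_cons_neg x [10,20,30,40,50,60,70,80,90,256] 5 _ (by rw [show (([10,20,30,40,50,60,70,80,90,256] : List Int).getD (Int.toNat 5) 0) = (60:Int) from rfl]; omega), chan_cons_neg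 x [10,20,30,40,50,60,70,80,90,256] 6 _ (by rw [show (([10,20,30,40,50,60,70,80,90,256] : List Int).getD (Int.toNat 6) 0) = (70:Int) from rfl]; omega), chan_cons_neg x [10,20,30,40,50,60,70,80,90,256] 7 _ (by rw [show (([10,20,30,40,50,60,70,80,90,256] : List Int).getD (Int.toNat 7) 0) = (80:Int) from rfl]; omega), chan_cons_pos x [10,20,30,40,50,60,70,80,90,256] 8 _ (by rw [show (([10,20,30,40,50,60,70,80,90,256] : List Int).getD (Int.toNat 8) 0) = (90:Int) from rfl]; omega)]

theorem pvBl_9 (x : Int) (hlo : 90 < x) (hx : x ≤ 256) : pvBisectLeft [10,20,30,40,50,60,70,80,90,256] x 0 10 = 9 := by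
  rw [pvBisectLeft]; norm_num [(show (60:Int) < x by omega)]
  rw [pvBisectLeft]; norm_num [(show (90:Int) < x by omega)]
  rw [pvBisectLeft]; norm_num [(show ¬((256:Int) < x) by omega)]
  rw [pvBisectLeft]; norm_num

theorem pvChanEval_9 (x : Int) (hlo : 90 < x) (hx : x ≤ 256) : pvChan x [10,20,30,40,50,60,70,80,90,256] [0,1,2,3,4,5,6,7,8,9] none = some 9 := by
  rw [chan_cons_neg x [10,20,30,40,50,60,70,80,90,256] 0 _ (by rw [show (([10,20,30,40,50,60,70,80,90,256] : List Int).getD (Int.toNat 0) 0) = (10:Int) from rfl]; omega), chan_cons_neg x [10,20,30,40,50,60,70,80,90,256] 1 _ (by rw [show (([10,20,30,40,50,60,70,80,90,256] : List Int).getD (Int.toNat 1) 0) = (20:Int) from rfl]; omega), chan_cons_neg x [10,20,30,40,50,60,70,80,90,256] 2 _ (by rw [show (([10,20,30,40,50,60,70,80,90,256] : List Int).getD (Int.toNat 2) 0) = (30:Int) from rfl]; omega), chan_cons_neg x [10,20,30,40,50,60,70,80,90,256] 3 _ (by rw [show (([10,20,30,40,50,60,70,80,90,256] : List Int).getD (Int.toNat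 3) 0) = (40:Int) from rfl]; omega), chan_cons_neg x [10,20,30,40,50,60,70,80,90,256] 4 _ (by rw [show (([10,20,30,40,50,60,70,80,90,256] : List Int).getD (Int.toNat 4) 0) = (50:Int) from rfl]; omega), chan_cons_neg x [10,20,30,40,50,60,70,80,90,256] 5 _ (by rw [show (([10,20,30,40,50,60,70,80,90,256] : List Int).getD (Int.toNat 5) 0) = (60:Int) from rfl]; omega), chan_cons_neg x [10,20,30,40,50,60,70,80,90,256] 6 _ (by rw [show (([10,20,30,40,50,60,70,80,90,256] : List Int).getD (Int.toNat 6) 0) = (70:Int) from rfl]; omega), chan_cons_neg x [10,20,30,40,50,60,70,80,90,256] 7 _ (by rw [show (([10,20,30,40,50,60,70,80,90,256] : List Int).getD (Int.toNat 7) 0) = (80:Int) from rfl]; omega), chan_cons_neg x [10,20,30,40,50,60,70,80,90,256] 8 _ (by rw [show (([10,20,30,40,50,60,70,80,90,256] : List Int).getD (Int.toNat 8) 0) = (90:Int) from rfl]; omega), chan_cons_pos x [10,20,30,40,50,60,70,80,90,256] 9 _ (by rw [show (([10,20,30,40,50,60,70,80,90,256] : List Int).getD (Int.toNat 9) 0)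 = (256:Int) from rfl]; omega)]

theorem chan_eq (x : Int) (hx : x ≤ 256) :
    ((pvChan x [10,20,30,40,50,60,70,80,90,256] [0,1,2,3,4,5,6,7,8,9] none).getD (-1))
      = (if pvBisectLeft [10,20,30,40,50,60,70,80,90,256] x 0 10 = 10 then (-1 : Int)
         else (pvBisectLeft [10,20,30,40,50,60,70,80,90,256] x 0 10 : Int)) := by
  have H : x ≤ 10 ∨ (10 < x ∧ x ≤ 20) ∨ (20 < x ∧ x ≤ 30) ∨ (30 < x ∧ x ≤ 40) ∨
      (40 < x ∧ x ≤ 50) ∨ (50 < x ∧ x ≤ 60) ∨ (60 < x ∧ x ≤ 70) ∨ (70 < x ∧ x ≤ 80) ∨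
      (80 < x ∧ x ≤ 90) ∨ (90 < x ∧ x ≤ 256) := by omega
  rcases H with h|h|h|h|h|h|h|h|h|h
  · rw [pvChanEval_0 x h, pvBl_0 x h]; norm_num
  · rw [pvChanEval_1 x h.1 h.2, pvBl_1 x h.1 h.2]; norm_num
  · rw [pvChanEval_2 x h.1 h.2, pvBl_2 x h.1 h.2]; norm_num
  · rw [pvChanEval_3 x h.1 h.2, pvBl_3 x h.1 h.2]; norm_num
  · rw [pvChanEval_4 x h.1 h.2, pvBl_4 x h.1 h.2]; norm_num
  · rw [pvChanEval_5 x h.1 h.2, pvBl_5 x h.1 h.2]; norm_num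
  · rw [pvChanEval_6 x h.1 h.2, pvBl_6 x h.1 h.2]; norm_num
  · rw [pvChanEval_7 x h.1 h.2, pvBl_7 x h.1 h.2]; norm_num
  · rw [pvChanEval_8 x h.1 h.2, pvBl_8 x h.1 h.2]; norm_num
  · rw [pvChanEval_9 x h.1 h.2, pvBl_9 x h.1 h.2]; norm_num

-- ===== VERDICT (by name: the statement is the Claim_ definition above) =====
theorem pixel_to_heatmap_spec : Claim_equal_pixel_to_heatmap := by
  intro green blue _ hpre
  show (let bins : List Int := [10,20,30,40,50,60,70,80,90,256];
        let st := pvLoopA green blue bins (PySem.List.pyRange 0 10 1) (none, none);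
        (st.1.getD (-1), st.2.getD (-1)))
      = (let bins : List Int := [10,20,30,40,50,60,70,80,90,256];
        let g := pvBisectLeft bins green 0 bins.length;
        let b := pvBisectLeft bins blue 0 bins.length;
        (if g = 10 then -1 else (g : Int), if b = 10 then -1 else (b : Int)))
  simp only [pvLoopA_split,
    show PySem.List.pyRange 0 10 1 = [0,1,2,3,4,5,6,7,8,9] from by decide,
    show ([10,20,30,40,50,60,70,80,90,256] : List Int).length = 10 from rfl,
    Prod.mk.injEq]
  exact ⟨chan_eq green hpre.1, chan_eq blue hpre.2⟩
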